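-- pv_equiv track=rewrite | github.com/tdw419/pixelpack | experiments/expand4.py | make_predict_seed
-- ===== SOURCE A (Python) =====
-- def make_predict_seed(ranks: list) -> int:
--     """
--     Construct a PREDICT seed from a list of rank indices.
--
--     Each rank is encoded as unary: N ones followed by a zero.
--     The ranks are packed into the 28-bit payload LSB-first.
--
--     ranks: list of integers (0-15), each is the rank of the predicted byte.
--     Returns: 32-bit seed with strategy 0xA.
--     """
--     payload = 0
--     bit_pos = 0
--
--     for rank in ranks:
--         # Write 'rank' ones
--         for _ in range(rank):
--             if bit_pos >= 28:
--                 break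
--             payload |= (1 << bit_pos)
--             bit_pos += 1
--         # Write one zero
--         if bit_pos >= 28:
--             break
--         # zero is already 0, just advance
--         bit_pos += 1
--
--     return 0xA0000000 | (payload & 0x0FFFFFFF)
-- ===== SOURCE B (Python) =====
-- def make_predict_seed(ranks: list) -> int:
--     """Same seed, built by first materialising the 28-bit sequence, then folding it."""
--     bits = []
--     for rank in ranks:
--         if len(bits) >= 28:
--             break
--         bits.extend([1] * min(max(rank, 0), 28 - len(bits)))
--         if len(bits) < 28:
--             bits.append(0)
--     payload = sum(1 << i for i, b in enumerate(bits) if b)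
--     return 0xA0000000 | (payload & 0x0FFFFFFF)
-- ===== Notes on version B (the rewrite author's own statement) =====
-- stated objective: simpler
-- what changed: B first materialises the 28-bit sequence as a list (capped ones per rank plus a separating zero), then folds it into the payload with a single enumerate-sum, replacing A's nested break-driven in-place bit-OR loops.
import Mathlib
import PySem

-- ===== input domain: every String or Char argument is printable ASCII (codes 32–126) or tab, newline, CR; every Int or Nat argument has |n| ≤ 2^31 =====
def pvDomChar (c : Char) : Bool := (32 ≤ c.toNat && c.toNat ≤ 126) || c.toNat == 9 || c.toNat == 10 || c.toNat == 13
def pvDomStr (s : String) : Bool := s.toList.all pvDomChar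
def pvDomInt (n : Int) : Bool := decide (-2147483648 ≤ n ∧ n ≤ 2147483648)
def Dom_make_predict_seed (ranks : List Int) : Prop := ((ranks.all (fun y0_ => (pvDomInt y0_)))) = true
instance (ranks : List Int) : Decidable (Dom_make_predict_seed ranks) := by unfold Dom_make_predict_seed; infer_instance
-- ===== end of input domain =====

-- B builds the 28-bit sequence as a list first and then folds it into the payload,
-- replacing A's nested break-driven bit-writing loops (objective: simpler decomposition).

-- ===== PORT A =====
-- inner loop: 'for _ in range(rank): if bit_pos >= 28: break; payload |= 1 << bit_pos; bit_pos += 1'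
-- (range(rank) has rank.toNat iterations, counted down; the break is the early return)
def pvInnerA (payload : Int) (bit_pos : Nat) : Nat → Int × Nat
  | 0 => (payload, bit_pos)
  | fuel + 1 =>
    if 28 ≤ bit_pos then (payload, bit_pos)
    else pvInnerA (PySem.Int.bor payload ((1 : Int) <<< bit_pos)) (bit_pos + 1) fuel

-- outer loop over ranks, with the 'if bit_pos >= 28: break' after the inner loop
def pvOuterA : List Int → Int → Nat → Int
  | [], payload, _ => payload
  | rank :: rest, payload, bit_pos =>
    let s := pvInnerA payload bit_pos rank.toNat
    if 28 ≤ s.2 then s.1 else pvOuterA rest s.1 (s.2 + 1)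

def make_predict_seed (ranks : List Int) : Int :=
  PySem.Int.bor 0xA0000000 (PySem.Int.band (pvOuterA ranks 0 0) 0x0FFFFFFF)

-- ===== PORT B =====
-- build the bit list: min(max(rank,0), 28-len) ones, then a zero if room remains
def pvBitsB : List Int → List Int → List Int
  | [], bits => bits
  | rank :: rest, bits =>
    if 28 ≤ bits.length then bits
    else
      let bits1 := bits ++ List.replicate (min (max rank 0) ((28 : Int) - bits.length)).toNat 1
      let bits2 := if bits1.length < 28 then bits1 ++ [0] else bits1
      pvBitsB rest bits2

-- payload = sum(1 << i for i, b in enumerate(bits) if b)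
def pvPayB (bits : List Int) : Int :=
  bits.zipIdx.foldl (fun (s : Int) (p : Int × Nat) => if p.1 ≠ 0 then s + ((1 : Int) <<< p.2) else s) 0

def make_predict_seed_alt (ranks : List Int) : Int :=
  PySem.Int.bor 0xA0000000 (PySem.Int.band (pvPayB (pvBitsB ranks [])) 0x0FFFFFFF)

-- ===== PRECONDITION & SPEC =====
def Spec_make_predict_seed (ranks : List Int) (out : Int) : Prop := out = make_predict_seed_alt ranks
instance (ranks : List Int) (out : Int) : Decidable (Spec_make_predict_seed ranks out) := by unfold Spec_make_predict_seed; infer_instance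

-- ===== CLAIM (what is proved, stated in full; the proofs are below) =====
def Claim_equal_make_predict_seed : Prop := ∀ (ranks : List Int), Dom_make_predict_seed ranks → Spec_make_predict_seed ranks (make_predict_seed ranks)

-- ===== LEMMAS AND PROOFS =====

-- the bit value of a list of bits read LSB-first starting at position n
def pvPay2 : List Int → Nat → Int
  | [], _ => 0
  | b :: bs, i => (if b ≠ 0 then ((1 : Int) <<< i) else 0) + pvPay2 bs (i + 1)

theorem pvPayB_foldl (bits : List Int) : ∀ (n : Nat) (s : Int),
    (bits.zipIdx n).foldl (fun (s : Int) (p : Int × Nat) => if p.1 ≠ 0 then s + ((1 : Int) <<< p.2) else s) s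
      = s + pvPay2 bits n := by
  induction bits with
  | nil => simp [pvPay2]
  | cons b bs ih =>
    intro n s
    simp only [List.zipIdx_cons, List.foldl_cons, pvPay2, ih]
    split <;> ring

theorem pvPay2_append (xs ys : List Int) : ∀ n,
    pvPay2 (xs ++ ys) n = pvPay2 xs n + pvPay2 ys (n + xs.length) := by
  induction xs with
  | nil => intro n; simp [pvPay2]
  | cons x xs ih =>
    intro n
    simp only [List.cons_append, pvPay2, ih, List.length_cons]
    have : n + 1 + xs.length = n + (xs.length + 1) := by omega
    rw [this]; ring

theorem pvPay2_nonneg (bits : List Int) : ∀ n, 0 ≤ pvPay2 bits n := by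
  induction bits with
  | nil => intro n; simp [pvPay2]
  | cons b bs ih =>
    intro n
    have h1 : (0:Int) ≤ (1:Int) <<< n := by rw [Int.shiftLeft_eq]; positivity
    have := ih (n + 1)
    simp only [pvPay2]; split <;> omega

theorem pvPay2_lt (bits : List Int) : ∀ n,
    pvPay2 bits n ≤ 2 ^ (n + bits.length) - 2 ^ n := by
  induction bits with
  | nil => intro n; simp [pvPay2]
  | cons b bs ih =>
    intro n
    have h1 : ((1:Int) <<< n) = 2 ^ n := by rw [Int.shiftLeft_eq]; ring
    have h2 := ih (n + 1)
    have h3 : (2:Int) ^ (n + 1) = 2 * 2 ^ n := by ring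
    have h4 : (2:Int) ^ (n + 1 + bs.length) = 2 ^ (n + (bs.length + 1)) := by ring_nf
    have hpos : (0:Int) ≤ 2 ^ n := by positivity
    simp only [pvPay2, List.length_cons, h1]
    rw [h4, h3] at h2
    split <;> omega

theorem pvBor_pow (p : Int) (n : Nat) (hp0 : 0 ≤ p) (hp : p < 2 ^ n) :
    PySem.Int.bor p ((1 : Int) <<< n) = p + (1 : Int) <<< n := by
  have hsh : ((1:Int) <<< n) = (((1 <<< n : Nat)) : Int) := by
    rw [Int.shiftLeft_eq, Nat.shiftLeft_eq]; push_cast; ring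
  have hpn : p = ((p.toNat : Nat) : Int) := by omega
  rw [hsh, hpn, PySem.Int.bor_natCast]
  have hlt : p.toNat < 2 ^ n := by
    have : ((p.toNat : Nat) : Int) < ((2 ^ n : Nat) : Int) := by push_cast; omega
    exact_mod_cast this
  have hor : p.toNat ||| 1 <<< n = p.toNat + 1 <<< n := by
    rw [Nat.shiftLeft_eq, one_mul]
    have := Nat.two_pow_add_eq_or_of_lt hlt 1
    rw [mul_one] at this
    rw [Nat.lor_comm, ← this]
    omega
  rw [hor]; push_cast; omega

theorem pvInner_sim (fuel : Nat) : ∀ (p : Int) (n : Nat), 0 ≤ p → p < 2 ^ n →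
    pvInnerA p n fuel = (p + pvPay2 (List.replicate (min fuel (28 - n)) 1) n,
                      n + min fuel (28 - n)) := by
  induction fuel with
  | zero => intro p n _ _; simp [pvInnerA, pvPay2]
  | succ l ih =>
    intro p n hp0 hp
    by_cases h : 28 ≤ n
    · have : min (l + 1) (28 - n) = 0 := by omega
      simp [pvInnerA, h, pvPay2]
    · have hn : n < 28 := by omega
      have hsh : ((1:Int) <<< n) = 2 ^ n := by rw [Int.shiftLeft_eq]; ring
      have hbor := pvBor_pow p n hp0 hp
      have hp0' : 0 ≤ p + (1:Int) <<< n := by rw [hsh]; positivity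
      have hp' : p + (1:Int) <<< n < 2 ^ (n + 1) := by
        rw [hsh]; have : (2:Int) ^ (n+1) = 2^n + 2^n := by ring
        omega
      have hmin : min (l + 1) (28 - n) = min l (28 - (n + 1)) + 1 := by omega
      simp only [pvInnerA, if_neg h, hbor, ih _ _ hp0' hp', hmin, List.replicate_succ, pvPay2]
      rw [Prod.mk.injEq]
      constructor
      · simp only [ne_eq, one_ne_zero, not_false_eq_true, if_true]; ring
      · omega

theorem pvBitsB_full (ranks : List Int) : ∀ bits : List Int, 28 ≤ bits.length →
    pvBitsB ranks bits = bits := by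
  induction ranks with
  | nil => intro bits _; rfl
  | cons r rest ih => intro bits h; simp [pvBitsB, h]

theorem pvSim (ranks : List Int) : ∀ bits : List Int, bits.length ≤ 28 →
    pvOuterA ranks (pvPay2 bits 0) bits.length = pvPay2 (pvBitsB ranks bits) 0 := by
  induction ranks with
  | nil => intro bits _; rfl
  | cons r rest ih =>
    intro bits hlen
    have hp0 := pvPay2_nonneg bits 0
    have hplt : pvPay2 bits 0 < 2 ^ bits.length := by
      have := pvPay2_lt bits 0
      have h2 : (0:Int) < 2 ^ (0 : Nat) := by norm_num
      have h3 : (2:Int) ^ (0 + bits.length) = 2 ^ bits.length := by ring_nf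
      omega
    by_cases hfull : 28 ≤ bits.length
    · -- bit_pos already 28: A's inner loop writes nothing and A breaks; B returns bits
      have hmin : min r.toNat (28 - bits.length) = 0 := by omega
      simp only [pvOuterA, pvInner_sim _ _ _ hp0 hplt, hmin, pvBitsB,
        List.replicate_zero, pvPay2, add_zero, if_pos hfull]
    · have hlt : bits.length < 28 := by omega
      set k : Nat := min r.toNat (28 - bits.length) with hk
      have hkB : (min (max r 0) ((28 : Int) - bits.length)).toNat = k := by omega
      set bits1 := bits ++ List.replicate k 1 with hb1
      have hlen1 : bits1.length = bits.length + k := by simp [hb1]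
      have hpay1 : pvPay2 bits1 0 = pvPay2 bits 0 + pvPay2 (List.replicate k 1) bits.length := by
        rw [hb1, pvPay2_append]; simp
      have houter : pvOuterA (r :: rest) (pvPay2 bits 0) bits.length
          = if 28 ≤ bits.length + k then pvPay2 bits1 0
            else pvOuterA rest (pvPay2 bits1 0) (bits.length + k + 1) := by
        simp only [pvOuterA, pvInner_sim _ _ _ hp0 hplt, ← hk, hpay1]
      by_cases hkfull : 28 ≤ bits.length + k
      · -- the ones fill the payload: A breaks, B appends no zero and later iterations do nothing
        have h28 : ¬ bits1.length < 28 := by omega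
        rw [houter, if_pos hkfull]
        simp only [pvBitsB, if_neg hfull, hkB, ← hb1, if_neg h28,
          pvBitsB_full rest bits1 (by omega)]
      · have h28 : bits1.length < 28 := by omega
        have hpay2 : pvPay2 (bits1 ++ [0]) 0 = pvPay2 bits1 0 := by
          rw [pvPay2_append]; simp [pvPay2]
        have hlen2 : (bits1 ++ [0]).length = bits.length + k + 1 := by simp [hlen1]
        rw [houter, if_neg hkfull]
        have := ih (bits1 ++ [0]) (by omega)
        rw [hpay2, hlen2] at this
        simp only [pvBitsB, if_neg hfull, hkB, ← hb1, if_pos h28, this]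

-- ===== VERDICT (by name: the statement is the Claim_ definition above) =====
theorem make_predict_seed_spec : Claim_equal_make_predict_seed := by
  intro ranks _
  unfold Spec_make_predict_seed make_predict_seed make_predict_seed_alt pvPayB
  rw [pvPayB_foldl, zero_add]
  have h := pvSim ranks [] (by simp)
  simp only [pvPay2, List.length_nil] at h
  rw [h]
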